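-- pv_equiv track=rewrite | github.com/Matheo682/Jezyki-i-paradygmaty-programowania | Lab01/Zad03.py | schedule_tasks_functional
-- ===== SOURCE A (Python) =====
-- def schedule_tasks_functional(tasks):
--     sorted_tasks = sorted(tasks, key=lambda task: task[1])
--
--     optimal_order = list(map(lambda task: task[0], sorted_tasks))
--     total_waiting_time = 0
--     elapsed_time = 0
--     for task in sorted_tasks:
--         total_waiting_time += elapsed_time
--         elapsed_time += task[1]
--
--     return optimal_order, total_waiting_time
-- ===== SOURCE B (Python) =====
-- def schedule_tasks_functional(tasks):
--     # Walk the sorted schedule back-to-front: a task's duration delays every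
--     # task behind it exactly once, so charge duration * behind; no running
--     # elapsed time is ever maintained. Names are collected reversed, then flipped.
--     rev_names = []
--     waiting = 0
--     behind = 0
--     for name, duration in reversed(sorted(tasks, key=lambda t: t[1])):
--         rev_names.append(name)
--         waiting += behind * duration
--         behind += 1
--     return rev_names[::-1], waiting
-- ===== Notes on version B (the rewrite author's own statement) =====
-- stated objective: alternative
-- what changed: Replaces A's forward loop carrying a running elapsed-time accumulator with a reverse traversal of the sorted schedule that charges each duration once per task behind it (a count, not a time) and builds the name list back-to-front.
import Mathlib
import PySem

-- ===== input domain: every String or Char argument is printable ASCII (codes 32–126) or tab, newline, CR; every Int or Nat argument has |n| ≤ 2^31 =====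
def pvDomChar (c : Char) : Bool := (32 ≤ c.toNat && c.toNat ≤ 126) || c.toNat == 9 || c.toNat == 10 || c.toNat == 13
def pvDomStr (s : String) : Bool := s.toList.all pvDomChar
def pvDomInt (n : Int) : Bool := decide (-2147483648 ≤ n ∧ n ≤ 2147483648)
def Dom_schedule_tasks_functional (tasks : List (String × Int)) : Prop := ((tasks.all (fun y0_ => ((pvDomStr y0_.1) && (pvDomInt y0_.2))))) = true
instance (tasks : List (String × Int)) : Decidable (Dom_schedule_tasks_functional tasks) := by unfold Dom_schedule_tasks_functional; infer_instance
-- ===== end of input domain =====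

-- B replaces A's forward loop with a running elapsed time by a reverse traversal
-- charging each duration once per task behind it (objective: alternative).

-- ===== PORT A =====
def schedule_tasks_functional (tasks : List (String × Int)) : List String × Int :=
  let sorted_tasks := PySem.List.sorted tasks (fun task => task.2)
  let optimal_order := sorted_tasks.map (fun task => task.1)
  -- total_waiting_time, elapsed_time accumulated over the loop
  let st := sorted_tasks.foldl
    (fun (s : Int × Int) task => (s.1 + s.2, s.2 + task.2)) (0, 0)
  (optimal_order, st.1)

-- ===== PORT B =====
def schedule_tasks_functional_alt (tasks : List (String × Int)) : List String × Int :=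
  -- state: (rev_names appended in visit order, waiting, behind)
  let st := (PySem.List.sorted tasks (fun t => t.2)).reverse.foldl
    (fun (s : List String × Int × Int) t =>
      (s.1 ++ [t.1], s.2.1 + s.2.2 * t.2, s.2.2 + 1)) ([], 0, 0)
  (st.1.reverse, st.2.1)

-- ===== PRECONDITION & SPEC =====
def Spec_schedule_tasks_functional (tasks : List (String × Int)) (out : List String × Int) : Prop := out = schedule_tasks_functional_alt tasks
instance (tasks : List (String × Int)) (out : List String × Int) : Decidable (Spec_schedule_tasks_functional tasks out) := by unfold Spec_schedule_tasks_functional; infer_instance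

-- ===== CLAIM =====
def Claim_equal_schedule_tasks_functional : Prop := ∀ (tasks : List (String × Int)), Dom_schedule_tasks_functional tasks → Spec_schedule_tasks_functional tasks (schedule_tasks_functional tasks)

-- ===== LEMMAS AND PROOFS =====

-- waiting-time value: each element's duration counted (length of its tail) times
def pvW : List (String × Int) → Int
  | [] => 0
  | t :: ts => (ts.length : Int) * t.2 + pvW ts

-- B's waiting value: each element's duration weighted by its 0-based position from b
def pvV : List (String × Int) → Int → Int
  | [], _ => 0
  | t :: ts, b => b * t.2 + pvV ts (b + 1)

theorem pvA_loop (l : List (String × Int)) (tw el : Int) :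
    (l.foldl (fun (s : Int × Int) task => (s.1 + s.2, s.2 + task.2)) (tw, el)).1
      = tw + (l.length : Int) * el + pvW l := by
  induction l generalizing tw el with
  | nil => simp [pvW]
  | cons t ts ih =>
    simp only [List.foldl_cons, ih, pvW, List.length_cons]
    push_cast
    ring

theorem pvB_loop (m : List (String × Int)) (ns : List String) (w b : Int) :
    m.foldl (fun (s : List String × Int × Int) t =>
        (s.1 ++ [t.1], s.2.1 + s.2.2 * t.2, s.2.2 + 1)) (ns, w, b)
      = (ns ++ m.map (fun t => t.1), w + pvV m b, b + (m.length : Int)) := by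
  induction m generalizing ns w b with
  | nil => simp [pvV]
  | cons t ts ih =>
    simp only [List.foldl_cons, ih, pvV, List.map_cons, List.length_cons]
    refine Prod.ext (by simp) (Prod.ext (by simp; ring) (by push_cast; ring))

theorem pvV_append_last (m : List (String × Int)) (t : String × Int) (b : Int) :
    pvV (m ++ [t]) b = pvV m b + (b + (m.length : Int)) * t.2 := by
  induction m generalizing b with
  | nil => simp [pvV]
  | cons u us ih =>
    simp only [List.cons_append, pvV, ih, List.length_cons]
    push_cast
    ring

theorem pvV_reverse (l : List (String × Int)) :
    pvV l.reverse 0 = pvW l := by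
  induction l with
  | nil => simp [pvV, pvW]
  | cons t ts ih =>
    simp only [List.reverse_cons, pvV_append_last, ih, pvW, List.length_reverse]
    ring

-- ===== VERDICT =====
theorem schedule_tasks_functional_spec : Claim_equal_schedule_tasks_functional := by
  intro tasks _
  unfold Spec_schedule_tasks_functional schedule_tasks_functional schedule_tasks_functional_alt
  simp only
  rw [pvA_loop, pvB_loop, pvV_reverse]
  simp [List.map_reverse]
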